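-- pv_equiv track=rewrite | github.com/Porter-coder/special-architect | backend/src/services/file_service.py | _find_main_file
-- ===== SOURCE A (Python) =====
-- from typing import Dict, List, Optional, Tuple
--
-- def _find_main_file(files: Dict[str, str]) -> Optional[str]:
--     """Find the main executable file in the project."""
--     # Priority order for main files
--     main_candidates = [
--         'main.py', 'app.py', 'index.js', 'main.js',
--         'Program.cs', 'main.go', 'lib.rs', 'main.rs'
--     ]
--
--     for candidate in main_candidates:
--         if candidate in files:
--             return candidate
--
--     # Fallback: first Python file
--     python_files = [f for f in files.keys() if f.endswith('.py')]
--     if python_files: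
--         return python_files[0]
--
--     return None
-- ===== SOURCE B (Python) =====
-- from typing import Dict, Optional
--
--
-- def _find_main_file(files: Dict[str, str]) -> Optional[str]:
--     """Find the main executable file in the project (single pass)."""
--     main_candidates = [
--         'main.py', 'app.py', 'index.js', 'main.js',
--         'Program.cs', 'main.go', 'lib.rs', 'main.rs'
--     ]
--     prio = {name: i for i, name in enumerate(main_candidates)}
--
--     best = None       # (priority index, candidate name) of best candidate so far
--     first_py = None   # first filename ending in '.py', in dict order
--     for name in files:
--         i = prio.get(name)
--         if i is not None and (best is None or i < best[0]):
--             best = (i, name)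
--         if first_py is None and name.endswith('.py'):
--             first_py = name
--
--     if best is not None:
--         return best[1]
--     return first_py
-- ===== Notes on version B (the rewrite author's own statement) =====
-- stated objective: alternative
-- what changed: Replaced A's two ordered passes (a loop over the candidate list probing the dict, then a second pass building the list of .py files) by a single pass over the files that maintains a min-priority-index accumulator (via a precomputed name->index table) and the first .py filename.
import Mathlib
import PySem

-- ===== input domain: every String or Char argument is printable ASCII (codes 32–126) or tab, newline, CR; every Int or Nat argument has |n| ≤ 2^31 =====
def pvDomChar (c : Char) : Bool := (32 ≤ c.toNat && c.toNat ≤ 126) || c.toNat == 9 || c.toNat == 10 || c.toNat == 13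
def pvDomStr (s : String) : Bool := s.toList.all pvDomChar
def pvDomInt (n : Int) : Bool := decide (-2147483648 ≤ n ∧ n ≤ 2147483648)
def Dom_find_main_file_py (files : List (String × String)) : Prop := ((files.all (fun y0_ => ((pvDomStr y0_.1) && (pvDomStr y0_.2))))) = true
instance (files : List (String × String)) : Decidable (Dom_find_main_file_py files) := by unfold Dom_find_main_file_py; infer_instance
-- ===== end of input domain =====

-- B replaces A's two ordered passes (candidate loop + fallback list) by ONE pass over
-- the files maintaining a best-priority accumulator and the first '.py' name (objective: alternative).

-- ===== PORT A =====
def pvCands : List String :=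
  ["main.py", "app.py", "index.js", "main.js", "Program.cs", "main.go", "lib.rs", "main.rs"]

-- the 'for candidate in main_candidates: if candidate in files: return candidate' loop
def pvLoopA : List String → List (String × String) → Option String
  | [], _ => none
  | c :: cs, files =>
      if files.any (fun kv => kv.1 == c) then some c else pvLoopA cs files

def find_main_file_py (files : List (String × String)) : Option String :=
  match pvLoopA pvCands files with
  | some c => some c
  | none =>
      -- python_files = [f for f in files.keys() if f.endswith('.py')]; return python_files[0] if any
      let python_files := (files.map Prod.fst).filter (fun f => PySem.Str.endswith f ".py")
      match python_files with
      | f :: _ => some f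
      | [] => none

-- ===== PORT B =====
-- prio = {name: i for i, name in enumerate(main_candidates)}
def pvPrio : PySem.Dict String Int :=
  (PySem.List.enumerate pvCands 0).foldl (fun d p => d.insert p.2 p.1) PySem.Dict.empty

-- one iteration of B's single loop: state = (best, first_py)
def pvStepB (s : Option (Int × String) × Option String) (kv : String × String) :
    Option (Int × String) × Option String :=
  let best :=
    match pvPrio.get? kv.1 with
    | some i =>
        match s.1 with
        | none => some (i, kv.1)
        | some b => if i < b.1 then some (i, kv.1) else some b
    | none => s.1
  let first_py :=
    match s.2 with
    | none => if PySem.Str.endswith kv.1 ".py" then some kv.1 else none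
    | some x => some x
  (best, first_py)

def find_main_file_py_alt (files : List (String × String)) : Option String :=
  let r := files.foldl pvStepB (none, none)
  match r.1 with
  | some b => some b.2
  | none => r.2

-- ===== PRECONDITION & SPEC =====
def Spec_find_main_file_py (files : List (String × String)) (out : Option String) : Prop := out = find_main_file_py_alt files
instance (files : List (String × String)) (out : Option String) : Decidable (Spec_find_main_file_py files out) := by unfold Spec_find_main_file_py; infer_instance

-- ===== CLAIM (what is proved, stated in full; the proofs are below) =====
def Claim_equal_find_main_file_py : Prop := ∀ (files : List (String × String)), Dom_find_main_file_py files → Spec_find_main_file_py files (find_main_file_py files)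

-- ===== LEMMAS AND PROOFS =====

-- does some key of fs equal c?
def pvPres (fs : List (String × String)) (c : String) : Bool := fs.any (fun kv => kv.1 == c)

-- the "best" component of B's step, in isolation
def pvStepBest (b : Option (Int × String)) (kv : String × String) : Option (Int × String) :=
  match pvPrio.get? kv.1 with
  | some i =>
      match b with
      | none => some (i, kv.1)
      | some b => if i < b.1 then some (i, kv.1) else some b
  | none => b

-- the "first_py" component of B's step, in isolation
def pvStepPy (p : Option String) (kv : String × String) : Option String :=
  match p with
  | none => if PySem.Str.endswith kv.1 ".py" then some kv.1 else none
  | some x => some x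

-- left-biased min-priority merge
def pvMg : Option (Int × String) → Option (Int × String) → Option (Int × String)
  | none, y => y
  | some a, none => some a
  | some a, some c => if c.1 < a.1 then some c else some a

-- (index, name) for a single key, if it is a candidate
def pvPk (k : String) : Option (Int × String) := (pvPrio.get? k).map (fun i => (i, k))

-- closed characterisation of the best-candidate accumulator over fs
def pvF (fs : List (String × String)) : Option (Int × String) :=
  if pvPres fs "main.py" = true then some (0, "main.py")
  else if pvPres fs "app.py" = true then some (1, "app.py")
  else if pvPres fs "index.js" = true then some (2, "index.js")
  else if pvPres fs "main.js" = true then some (3, "main.js")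
  else if pvPres fs "Program.cs" = true then some (4, "Program.cs")
  else if pvPres fs "main.go" = true then some (5, "main.go")
  else if pvPres fs "lib.rs" = true then some (6, "lib.rs")
  else if pvPres fs "main.rs" = true then some (7, "main.rs")
  else none

set_option maxHeartbeats 1000000 in
set_option maxRecDepth 8000 in
theorem pvPrio_get?_eq (k : String) :
    pvPrio.get? k =
      if k = "main.py" then some 0
      else if k = "app.py" then some 1
      else if k = "index.js" then some 2
      else if k = "main.js" then some 3
      else if k = "Program.cs" then some 4
      else if k = "main.go" then some 5
      else if k = "lib.rs" then some 6
      else if k = "main.rs" then some 7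
      else none := by
  have h : pvPrio = PySem.Dict.mk [("main.py",0),("app.py",1),("index.js",2),("main.js",3),
      ("Program.cs",4),("main.go",5),("lib.rs",6),("main.rs",7)] := by rfl
  rw [h]
  simp only [PySem.Dict.get?_mk_cons, beq_iff_eq]
  split_ifs <;> first | rfl | simp_all

theorem pvStepB_split (s : Option (Int × String) × Option String) (kv : String × String) :
    pvStepB s kv = (pvStepBest s.1 kv, pvStepPy s.2 kv) := rfl

theorem pvFold_split (fs : List (String × String)) (b : Option (Int × String)) (p : Option String) :
    fs.foldl pvStepB (b, p) = (fs.foldl pvStepBest b, fs.foldl pvStepPy p) := by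
  induction fs generalizing b p with
  | nil => rfl
  | cons x t ih => simp [List.foldl, pvStepB_split, ih]

theorem pvStepBest_eq_mg (b : Option (Int × String)) (kv : String × String) :
    pvStepBest b kv = pvMg b (pvPk kv.1) := by
  unfold pvStepBest pvPk pvMg
  cases pvPrio.get? kv.1 <;> cases b <;> rfl

theorem pvMg_none_right (a : Option (Int × String)) : pvMg a none = a := by
  cases a <;> rfl

theorem pvMg_assoc (a b c : Option (Int × String)) :
    pvMg (pvMg a b) c = pvMg a (pvMg b c) := by
  rcases a with _ | ⟨i, x⟩ <;> rcases b with _ | ⟨j, y⟩ <;> rcases c with _ | ⟨k, z⟩ <;> try rfl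
  · rw [pvMg_none_right, pvMg_none_right]
  · have e : ∀ (a b : Int) (u v : String), pvMg (some (a, u)) (some (b, v)) =
        if b < a then some (b, v) else some (a, u) := fun _ _ _ _ => rfl
    simp only [e]
    split_ifs <;>
      first
        | rfl
        | (simp only [e]; split_ifs <;> first | rfl | (exfalso; omega))

theorem pvFoldBest_mg (fs : List (String × String)) (s : Option (Int × String)) :
    fs.foldl pvStepBest s = pvMg s (fs.foldl pvStepBest none) := by
  induction fs generalizing s with
  | nil => cases s <;> rfl
  | cons x t ih =>
      simp only [List.foldl]
      rw [ih, ih (pvStepBest none x), pvStepBest_eq_mg, pvStepBest_eq_mg, pvMg_assoc]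
      rfl

theorem pv_if_or_bool {α : Type} (a b : Bool) (x y : α) :
    (if (a || b) = true then x else y) = if a = true then x else if b = true then x else y := by
  cases a <;> simp

theorem pvMg_none_left (a : Option (Int × String)) : pvMg none a = a := rfl

theorem pvPk_eq (k : String) :
    pvPk k =
      if k = "main.py" then some ((0 : Int), "main.py")
      else if k = "app.py" then some (1, "app.py")
      else if k = "index.js" then some (2, "index.js")
      else if k = "main.js" then some (3, "main.js")
      else if k = "Program.cs" then some (4, "Program.cs")
      else if k = "main.go" then some (5, "main.go")
      else if k = "lib.rs" then some (6, "lib.rs")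
      else if k = "main.rs" then some (7, "main.rs")
      else none := by
  unfold pvPk
  rw [pvPrio_get?_eq]
  split_ifs <;> first | rfl | (subst_vars; rfl)

theorem pvPres_cons (x : String × String) (t : List (String × String)) (c : String) :
    pvPres (x :: t) c = ((x.1 == c) || pvPres t c) := by
  simp [pvPres]

set_option maxHeartbeats 2000000 in
set_option maxRecDepth 8000 in
theorem pvBest_eq_F (fs : List (String × String)) :
    fs.foldl pvStepBest none = pvF fs := by
  induction fs with
  | nil => rfl
  | cons x t ih =>
      simp only [List.foldl]
      rw [pvFoldBest_mg, ih, pvStepBest_eq_mg, pvPk_eq]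
      conv_rhs => unfold pvF
      simp only [pvPres_cons, pv_if_or_bool, beq_iff_eq]
      rw [pvMg_none_left]
      by_cases h0 : x.1 = "main.py"
      · simp only [if_pos h0]; unfold pvF; split_ifs <;> rfl
      · simp only [if_neg h0]
        by_cases h1 : x.1 = "app.py"
        · simp only [if_pos h1]; unfold pvF; split_ifs <;> rfl
        · simp only [if_neg h1]
          by_cases h2 : x.1 = "index.js"
          · simp only [if_pos h2]; unfold pvF; split_ifs <;> rfl
          · simp only [if_neg h2]
            by_cases h3 : x.1 = "main.js"
            · simp only [if_pos h3]; unfold pvF; split_ifs <;> rfl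
            · simp only [if_neg h3]
              by_cases h4 : x.1 = "Program.cs"
              · simp only [if_pos h4]; unfold pvF; split_ifs <;> rfl
              · simp only [if_neg h4]
                by_cases h5 : x.1 = "main.go"
                · simp only [if_pos h5]; unfold pvF; split_ifs <;> rfl
                · simp only [if_neg h5]
                  by_cases h6 : x.1 = "lib.rs"
                  · simp only [if_pos h6]; unfold pvF; split_ifs <;> rfl
                  · simp only [if_neg h6]
                    by_cases h7 : x.1 = "main.rs"
                    · simp only [if_pos h7]; unfold pvF; split_ifs <;> rfl
                    · simp only [if_neg h7]
                      rw [pvMg_none_left]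
                      unfold pvF
                      rfl

theorem pvPy_some (fs : List (String × String)) (x : String) :
    fs.foldl pvStepPy (some x) = some x := by
  induction fs with
  | nil => rfl
  | cons y t ih => simpa [List.foldl, pvStepPy] using ih

theorem pvPy_eq_find (fs : List (String × String)) :
    fs.foldl pvStepPy none =
      (fs.find? (fun kv => PySem.Str.endswith kv.1 ".py")).map Prod.fst := by
  induction fs with
  | nil => rfl
  | cons x t ih =>
      rw [List.foldl_cons, List.find?_cons]
      have hs : pvStepPy none x = if PySem.Str.endswith x.1 ".py" then some x.1 else none := rfl
      rw [hs]
      cases h : PySem.Str.endswith x.1 ".py"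
      · simpa using ih
      · simp [pvPy_some]

theorem pvFallback_eq_find (fs : List (String × String)) :
    (match (fs.map Prod.fst).filter (fun f => PySem.Str.endswith f ".py") with
      | f :: _ => some f
      | [] => none) =
      (fs.find? (fun kv => PySem.Str.endswith kv.1 ".py")).map Prod.fst := by
  induction fs with
  | nil => rfl
  | cons x t ih =>
      rw [List.map_cons, List.filter_cons, List.find?_cons]
      cases h : PySem.Str.endswith x.1 ".py"
      · simpa using ih
      · simp

-- ===== VERDICT (by name: the statement is the Claim_ definition above) =====
theorem find_main_file_py_spec : Claim_equal_find_main_file_py := by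
  intro files _
  unfold Spec_find_main_file_py find_main_file_py find_main_file_py_alt
  rw [show ((none, none) : Option (Int × String) × Option String) = (none, none) from rfl,
    pvFold_split, pvBest_eq_F, pvPy_eq_find]
  simp only [pvCands, pvLoopA]
  unfold pvF
  simp only [show ∀ (fs : List (String × String)) c,
      (fs.any (fun kv => kv.1 == c)) = pvPres fs c from fun _ _ => rfl]
  rw [pvFallback_eq_find files]
  split_ifs <;> rfl
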